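-- pv_equiv track=rewrite | github.com/marcelomhc/advent-of-code | 2021/day08.py | calculate_profile
-- ===== SOURCE A (Python) =====
-- def calculate_profile(displays):
--     letter_profile = {}
--     for display in displays:
--         for letter in display:
--             profile = letter_profile.get(letter, [0 for _ in range(8)])
--             profile[len(display)] += 1
--             letter_profile[letter] = profile
--     return letter_profile
-- ===== SOURCE B (Python) =====
-- def calculate_profile(displays):
--     counts = {}
--     for display in displays:
--         size = len(display)
--         for letter in display:
--             key = (letter, size)
--             counts[key] = counts.get(key, 0) + 1
--     result = {}
--     for (letter, size), c in counts.items():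
--         profile = result.setdefault(letter, [0] * 8)
--         profile[size] = c
--     return result
-- ===== Notes on version B (the rewrite author's own statement) =====
-- stated objective: faster
-- what changed: A threads a dict of 8-slot profile lists through every character, re-reading and re-storing a list per letter; B first accumulates a flat int counter keyed by (letter, display-length) in one pass, then reshapes it into the per-letter profile lists in a second pass over the counter's items.
import Mathlib
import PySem

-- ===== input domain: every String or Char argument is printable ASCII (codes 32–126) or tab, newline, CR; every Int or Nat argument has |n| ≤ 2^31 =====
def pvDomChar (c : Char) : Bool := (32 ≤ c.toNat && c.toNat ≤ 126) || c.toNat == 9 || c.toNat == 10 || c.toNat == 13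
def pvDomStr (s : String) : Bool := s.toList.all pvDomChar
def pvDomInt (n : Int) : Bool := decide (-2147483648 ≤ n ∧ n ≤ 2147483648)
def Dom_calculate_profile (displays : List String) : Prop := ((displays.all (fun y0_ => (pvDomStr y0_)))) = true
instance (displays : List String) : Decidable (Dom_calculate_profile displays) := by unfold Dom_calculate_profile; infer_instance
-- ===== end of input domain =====

-- B replaces A's per-letter read-update-write of an 8-slot profile dict by a flat (letter, length) counter
-- built in one pass and reshaped into the profiles in a second pass (measurably faster by a constant factor).

-- ===== PORT A =====
def calculate_profile (displays : List String) : List (String × List Int) :=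
  (displays.foldl (fun letter_profile display =>
      display.toList.foldl (fun letter_profile letter =>
        let profile := letter_profile.getD (String.ofList [letter]) (List.replicate 8 (0 : Int))
        letter_profile.insert (String.ofList [letter])
          (PySem.List.pySetD profile (display.toList.length : Int)
            (PySem.List.pyGetD profile (display.toList.length : Int) 0 + 1)))
        letter_profile)
    PySem.Dict.empty).items

-- ===== PORT B =====
def calculate_profile_alt (displays : List String) : List (String × List Int) :=
  let counts : PySem.Dict (String × Int) Int :=
    displays.foldl (fun counts display =>
      let size : Int := (display.toList.length : Int)
      display.toList.foldl (fun counts letter =>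
        let key := (String.ofList [letter], size)
        counts.insert key (counts.getD key 0 + 1)) counts)
      PySem.Dict.empty
  -- 'profile = result.setdefault(letter, [0]*8); profile[size] = c' mutates the list held by the dict:
  -- exactly d[k] = f(d.get(k, [0]*8)), i.e. Dict.modify.
  let result : PySem.Dict String (List Int) :=
    counts.items.foldl (fun result q =>
      result.modify q.1.1 (List.replicate 8 (0 : Int))
        (fun profile => PySem.List.pySetD profile q.1.2 q.2)) PySem.Dict.empty
  result.items

-- ===== PRECONDITION & SPEC =====
-- Pre_ excludes exactly the inputs where A raises IndexError: a display of length ≥ 8 makes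
-- 'profile[len(display)] += 1' index past the 8-slot profile list (B's assembly raises there too).
def Pre_calculate_profile (displays : List String) : Prop :=
  ∀ s ∈ displays, s.toList.length < 8
instance (displays : List String) : Decidable (Pre_calculate_profile displays) := by
  unfold Pre_calculate_profile; infer_instance
def pvWitness_calculate_profile : List String := ["ab", "b", ""]

def Spec_calculate_profile (displays : List String) (out : List (String × List Int)) : Prop := out = calculate_profile_alt displays
instance (displays : List String) (out : List (String × List Int)) : Decidable (Spec_calculate_profile displays out) := by unfold Spec_calculate_profile; infer_instance

-- ===== CLAIM (what is proved, stated in full; the proofs are below) =====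
def Claim_equal_calculate_profile : Prop := ∀ (displays : List String), Dom_calculate_profile displays → Pre_calculate_profile displays → Spec_calculate_profile displays (calculate_profile displays)

-- ===== LEMMAS AND PROOFS =====

-- the flat stream of (letter-as-string, display-length) events both programs process
def pvStream (displays : List String) : List (String × Nat) :=
  displays.flatMap (fun s => s.toList.map (fun ch => (String.ofList [ch], s.toList.length)))

def pvPairsI (displays : List String) : List (String × Int) :=
  (pvStream displays).map (fun p => (p.1, (p.2 : Int)))

def pvDictA (displays : List String) : PySem.Dict String (List Int) :=
  (pvStream displays).foldl
    (fun d p => d.modify p.1 (List.replicate 8 (0 : Int))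
      (fun prof => prof.set p.2 (prof.getD p.2 0 + 1)))
    PySem.Dict.empty

def pvCounts (displays : List String) : PySem.Dict (String × Int) Int :=
  PySem.Dict.counter (pvPairsI displays)

def pvResult (displays : List String) : PySem.Dict String (List Int) :=
  (pvCounts displays).items.foldl
    (fun r q => r.modify q.1.1 (List.replicate 8 (0 : Int))
      (fun prof => PySem.List.pySetD prof q.1.2 q.2))
    PySem.Dict.empty

lemma pv_foldl_nested {σ : Type} (step : σ → String → Nat → σ) :
    ∀ (displays : List String) (init : σ),
      displays.foldl (fun d s => s.toList.foldl (fun d ch => step d (String.ofList [ch]) s.toList.length) d) init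
        = (pvStream displays).foldl (fun d p => step d p.1 p.2) init := by
  intro displays
  induction displays with
  | nil => intro init; rfl
  | cons s rest ih =>
      intro init
      simp only [List.foldl_cons, pvStream, List.flatMap_cons, List.foldl_append, List.foldl_map]
      exact ih _

lemma pvA_eq (displays : List String) :
    calculate_profile displays = (pvDictA displays).items := by
  unfold calculate_profile pvDictA
  refine congrArg PySem.Dict.items ?_
  simp only [PySem.List.pySetD_natCast, PySem.List.pyGetD_natCast]
  exact pv_foldl_nested
    (fun d k n => d.modify k (List.replicate 8 (0 : Int))
      (fun prof => prof.set n (prof.getD n 0 + 1))) displays PySem.Dict.empty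

lemma pvB_eq (displays : List String) :
    calculate_profile_alt displays = (pvResult displays).items := by
  have hc : displays.foldl (fun counts display =>
        display.toList.foldl (fun counts letter =>
          counts.insert (String.ofList [letter], (display.toList.length : Int))
            (counts.getD (String.ofList [letter], (display.toList.length : Int)) 0 + 1)) counts)
        PySem.Dict.empty = pvCounts displays := by
    refine (pv_foldl_nested (σ := PySem.Dict (String × Int) Int)
      (fun c k n => c.insert (k, (n : Int)) (c.getD (k, (n : Int)) 0 + 1))
      displays PySem.Dict.empty).trans ?_
    unfold pvCounts pvPairsI
    rw [← PySem.Dict.foldl_insert_getD_add_one_eq_counter, List.foldl_map]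
  unfold pvResult
  exact congrArg (fun c : PySem.Dict (String × Int) Int =>
    (c.items.foldl (fun result q =>
      result.modify q.1.1 (List.replicate 8 (0 : Int))
        (fun profile => PySem.List.pySetD profile q.1.2 q.2)) PySem.Dict.empty).items) hc

lemma pv_ofList_map {α β : Type} [BEq α] [LawfulBEq α] [BEq β] [LawfulBEq β] (f : α → β) :
    ∀ l : List α, PySem.Set.ofList ((PySem.Set.ofList l).map f) = PySem.Set.ofList (l.map f) := by
  intro l
  induction l using List.reverseRecOn with
  | nil => rfl
  | append_singleton xs x ih =>
      by_cases hx : x ∈ xs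
      · have h1 : PySem.Set.add (PySem.Set.ofList xs) x = PySem.Set.ofList xs :=
          PySem.Set.add_of_mem ((PySem.Set.mem_ofList _ _).mpr hx)
        have h2 : PySem.Set.add (PySem.Set.ofList (xs.map f)) (f x) = PySem.Set.ofList (xs.map f) :=
          PySem.Set.add_of_mem ((PySem.Set.mem_ofList _ _).mpr (List.mem_map_of_mem hx))
        rw [PySem.Set.ofList_append_singleton, h1, ih, List.map_append,
            show (List.map f [x]) = [f x] from rfl, PySem.Set.ofList_append_singleton, h2]
      · have h1 : PySem.Set.add (PySem.Set.ofList xs) x = PySem.Set.ofList xs ++ [x] :=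
          PySem.Set.add_of_not_mem (fun h => hx ((PySem.Set.mem_ofList _ _).mp h))
        rw [PySem.Set.ofList_append_singleton, h1, List.map_append,
            show (List.map f [x]) = [f x] from rfl, PySem.Set.ofList_append_singleton,
            List.map_append, show (List.map f [x]) = [f x] from rfl,
            PySem.Set.ofList_append_singleton, ih]

lemma pv_keys_eq (displays : List String) :
    (pvDictA displays).keys = (pvResult displays).keys := by
  unfold pvDictA pvResult pvCounts
  have hk1 := PySem.Dict.keys_foldl_modify_key (pvStream displays) (fun p : String × Nat => p.1)
    (List.replicate 8 (0 : Int)) (fun _ p prof => prof.set p.2 (prof.getD p.2 0 + 1)) PySem.Dict.empty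
  have hk2 := PySem.Dict.keys_foldl_modify_key (PySem.Dict.counter (pvPairsI displays)).items
    (fun q : (String × Int) × Int => q.1.1) (List.replicate 8 (0 : Int))
    (fun _ q prof => PySem.List.pySetD prof q.1.2 q.2) PySem.Dict.empty
  beta_reduce at hk1 hk2
  rw [hk1, hk2, PySem.Dict.keys_empty, PySem.Set.update_nil_left, PySem.Set.update_nil_left,
      PySem.Dict.items_counter, List.map_map]
  have : ((fun q : (String × Int) × Int => q.1.1) ∘ fun k => (k, (List.count k (pvPairsI displays) : Int)))
      = fun k : String × Int => k.1 := rfl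
  rw [this, pv_ofList_map (fun k : String × Int => k.1) (pvPairsI displays)]
  unfold pvPairsI
  rw [List.map_map]
  rfl

lemma pv_getD_foldl_modify {κ ν β : Type} [BEq κ] [LawfulBEq κ] [DecidableEq κ]
    (key : β → κ) (d0 : ν) (f : β → ν → ν) (ℓ : κ) :
    ∀ (l : List β) (d : PySem.Dict κ ν),
      (l.foldl (fun d x => d.modify (key x) d0 (f x)) d).getD ℓ d0
        = (l.filter (fun x => key x == ℓ)).foldl (fun v x => f x v) (d.getD ℓ d0) := by
  intro l
  induction l with
  | nil => intro d; rfl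
  | cons x rest ih =>
      intro d
      simp only [List.foldl_cons, List.filter_cons]
      by_cases h : key x = ℓ
      · rw [if_pos (by simp [h]), List.foldl_cons, ih, PySem.Dict.getD_modify, if_pos h.symm, h]
      · rw [if_neg (by simp [h]), ih, PySem.Dict.getD_modify, if_neg (fun hh => h hh.symm)]

lemma pv_foldl_length {β : Type} (f : List Int → β → List Int)
    (h : ∀ v x, (f v x).length = v.length) :
    ∀ (l : List β) (v : List Int), (l.foldl f v).length = v.length := by
  intro l
  induction l with
  | nil => intro v; rfl
  | cons x rest ih => intro v; rw [List.foldl_cons, ih, h]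

lemma pv_getD_set (prof : List Int) (i j : Nat) (a : Int)
    (hlen : prof.length = 8) (_hi : i < 8) (hj : j < 8) :
    (prof.set i a).getD j 0 = if i = j then a else prof.getD j 0 := by
  rw [List.getD_eq_getElem?_getD, List.getElem?_set, List.getD_eq_getElem?_getD, hlen]
  by_cases h : i = j
  · simp [h, hj]
  · simp [h]

lemma pvLA : ∀ (ms : List (String × Nat)) (prof : List Int),
    (∀ p ∈ ms, p.2 < 8) → prof.length = 8 → ∀ j : Nat, j < 8 →
    (ms.foldl (fun v p => v.set p.2 (v.getD p.2 0 + 1)) prof).getD j 0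
      = prof.getD j 0 + ((ms.map (fun p => p.2)).count j : Int) := by
  intro ms
  induction ms with
  | nil => intro prof _ _ j _; simp
  | cons p rest ih =>
      intro prof hms hlen j hj
      have hp2 : p.2 < 8 := hms p List.mem_cons_self
      rw [List.foldl_cons,
          ih _ (fun q hq => hms q (List.mem_cons_of_mem _ hq)) (by rw [List.length_set, hlen]) j hj,
          pv_getD_set prof p.2 j _ hlen hp2 hj, List.map_cons, List.count_cons]
      by_cases h : p.2 = j
      · rw [if_pos h, if_pos (by simp only [beq_iff_eq]; omega), h]
        push_cast
        ring
      · rw [if_neg h, if_neg (by simp only [beq_iff_eq]; omega)]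
        push_cast
        ring

lemma pvLB (ℓ : String) (g : String × Int → Int) :
    ∀ (ks : List (String × Int)) (prof : List Int),
      (∀ k ∈ ks, k.1 = ℓ ∧ 0 ≤ k.2 ∧ k.2 < 8) → (ks.map (fun k => k.2)).Nodup →
      prof.length = 8 → ∀ j : Nat, j < 8 →
      (ks.foldl (fun v k => PySem.List.pySetD v k.2 (g k)) prof).getD j 0
        = if (ℓ, (j : Int)) ∈ ks then g (ℓ, (j : Int)) else prof.getD j 0 := by
  intro ks
  induction ks with
  | nil => intro prof _ _ _ j _; simp
  | cons k rest ih =>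
      intro prof hks hnd hlen j hj
      obtain ⟨ka, kb⟩ := k
      obtain ⟨hk1, hk2, hk3⟩ := hks (ka, kb) List.mem_cons_self
      simp only at hk1 hk2 hk3
      subst ka
      have htl : ∀ q ∈ rest, q.1 = ℓ ∧ 0 ≤ q.2 ∧ q.2 < 8 :=
        fun q hq => hks q (List.mem_cons_of_mem _ hq)
      have hndtl : (rest.map (fun k => k.2)).Nodup := by
        simp only [List.map_cons] at hnd; exact hnd.of_cons
      rw [List.foldl_cons, PySem.List.pySetD_of_nonneg _ _ hk2,
          ih _ htl hndtl (by rw [List.length_set, hlen]) j hj]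
      by_cases hkj : kb = (j : Int)
      · subst hkj
        have hnotin : (ℓ, (j : Int)) ∉ rest := by
          intro hmem
          simp only [List.map_cons] at hnd
          exact (List.nodup_cons.mp hnd).1 (List.mem_map_of_mem hmem)
        rw [if_neg hnotin, if_pos List.mem_cons_self]
        have htn : ((j : Int)).toNat = j := Int.toNat_natCast j
        rw [htn, pv_getD_set prof j j _ hlen hj hj, if_pos rfl]
      · have hne : kb.toNat ≠ j := by omega
        rw [pv_getD_set prof kb.toNat j _ hlen (by omega) hj, if_neg hne]
        have hmemiff : ((ℓ, (j : Int)) ∈ (ℓ, kb) :: rest) ↔ ((ℓ, (j : Int)) ∈ rest) := by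
          simp only [List.mem_cons, Prod.mk.injEq]
          constructor
          · rintro (⟨-, h2⟩ | h2)
            · exact absurd h2.symm hkj
            · exact h2
          · exact Or.inr
        rw [if_congr hmemiff rfl rfl]

lemma pv_getD_eq (displays : List String) (h : Pre_calculate_profile displays) (ℓ : String) :
    (pvDictA displays).getD ℓ (List.replicate 8 (0 : Int))
      = (pvResult displays).getD ℓ (List.replicate 8 (0 : Int)) := by
  have hstream : ∀ p ∈ pvStream displays, p.2 < 8 := by
    intro p hp
    simp only [pvStream, List.mem_flatMap, List.mem_map] at hp
    obtain ⟨s, hs, ch, _, rfl⟩ := hp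
    exact h s hs
  have hA := pv_getD_foldl_modify (fun p : String × Nat => p.1) (List.replicate 8 (0 : Int))
      (fun p prof => prof.set p.2 (prof.getD p.2 0 + 1)) ℓ (pvStream displays) PySem.Dict.empty
  have hB := pv_getD_foldl_modify (fun q : (String × Int) × Int => q.1.1) (List.replicate 8 (0 : Int))
      (fun q prof => PySem.List.pySetD prof q.1.2 q.2) ℓ (pvCounts displays).items PySem.Dict.empty
  beta_reduce at hA hB
  unfold pvDictA pvResult
  rw [hA, hB, PySem.Dict.getD_empty]
  unfold pvCounts
  rw [PySem.Dict.items_counter, List.filter_map, List.foldl_map]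
  simp only [Function.comp_def]
  set msl := (pvStream displays).filter (fun p => p.1 == ℓ) with hmsl
  set ks := (PySem.Set.ofList (pvPairsI displays)).filter (fun k => k.1 == ℓ) with hks0
  have hmsl8 : ∀ p ∈ msl, p.2 < 8 := fun p hp => hstream p (List.mem_of_mem_filter hp)
  have hks : ∀ k ∈ ks, k.1 = ℓ ∧ 0 ≤ k.2 ∧ k.2 < 8 := by
    intro k hk
    obtain ⟨hmem, hpred⟩ := List.mem_filter.mp hk
    have hkp : k ∈ pvPairsI displays := (PySem.Set.mem_ofList _ _).mp hmem
    simp only [pvPairsI, List.mem_map] at hkp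
    obtain ⟨p, hp, rfl⟩ := hkp
    refine ⟨by simpa using hpred, ?_, ?_⟩
    · show (0 : Int) ≤ (p.2 : Int)
      positivity
    · show ((p.2 : Nat) : Int) < 8
      exact_mod_cast hstream p hp
  have hnodup : (ks.map (fun k => k.2)).Nodup := by
    refine List.Nodup.map_on ?_ (List.Nodup.filter _ (PySem.Set.nodup_ofList _))
    intro x hx y hy hxy
    have h1 : x.1 = ℓ := (hks x hx).1
    have h2 : y.1 = ℓ := (hks y hy).1
    exact Prod.ext (h1.trans h2.symm) hxy
  have hcnt : ∀ j : Nat, (pvPairsI displays).count (ℓ, (j : Int))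
      = (msl.map (fun p => p.2)).count j := by
    intro j
    rw [hmsl]
    unfold pvPairsI
    rw [List.count_eq_countP, List.count_eq_countP, List.countP_map, List.countP_map,
        List.countP_filter]
    refine List.countP_congr ?_
    intro p _
    simp only [Function.comp]
    by_cases h1 : p.1 = ℓ <;> by_cases h2 : p.2 = j <;> simp [h1, h2, Prod.ext_iff]
  have lenA : (msl.foldl (fun v p => v.set p.2 (v.getD p.2 0 + 1))
      (List.replicate 8 (0 : Int))).length = 8 := by
    rw [pv_foldl_length _ (fun v x => List.length_set), List.length_replicate]
  have lenB : (ks.foldl (fun v k => PySem.List.pySetD v k.2 ((pvPairsI displays).count k : Int))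
      (List.replicate 8 (0 : Int))).length = 8 := by
    rw [pv_foldl_length _ (fun v x => PySem.List.length_pySetD _ _ _), List.length_replicate]
  apply List.ext_getElem (by rw [lenA, lenB])
  intro j hj1 hj2
  have hj : j < 8 := by rw [lenA] at hj1; exact hj1
  rw [← List.getD_eq_getElem _ 0 hj1, ← List.getD_eq_getElem _ 0 hj2]
  rw [pvLA msl _ hmsl8 (by rw [List.length_replicate]) j hj,
      pvLB ℓ (fun k => ((pvPairsI displays).count k : Int)) ks _ hks hnodup
        (by rw [List.length_replicate]) j hj]
  rw [List.getD_replicate _ hj, hcnt j]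
  by_cases hmem : (ℓ, (j : Int)) ∈ ks
  · rw [if_pos hmem]
    omega
  · rw [if_neg hmem]
    have hnotin : (ℓ, (j : Int)) ∉ pvPairsI displays := by
      intro hmemp
      exact hmem (List.mem_filter.mpr ⟨(PySem.Set.mem_ofList _ _).mpr hmemp, by simp⟩)
    have hz : (pvPairsI displays).count (ℓ, (j : Int)) = 0 := List.count_eq_zero.mpr hnotin
    rw [hcnt j] at hz
    rw [hz]
    simp

-- ===== VERDICT (by name: the statement is the Claim_ definition above) =====
theorem calculate_profile_spec : Claim_equal_calculate_profile := by
  intro displays _ hpre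
  unfold Spec_calculate_profile
  rw [pvA_eq, pvB_eq]
  have hnd1 : (pvDictA displays).keys.Nodup :=
    PySem.Dict.nodup_keys_foldl_modify_key (pvStream displays)
      (fun p : String × Nat => p.1) (List.replicate 8 (0 : Int))
      (fun _ p prof => prof.set p.2 (prof.getD p.2 0 + 1)) PySem.Dict.empty
      PySem.Dict.nodup_keys_empty
  have hnd2 : (pvResult displays).keys.Nodup :=
    PySem.Dict.nodup_keys_foldl_modify_key (pvCounts displays).items
      (fun q : (String × Int) × Int => q.1.1) (List.replicate 8 (0 : Int))
      (fun _ q prof => PySem.List.pySetD prof q.1.2 q.2) PySem.Dict.empty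
      PySem.Dict.nodup_keys_empty
  rw [PySem.Dict.items_eq_map_keys _ hnd1 (List.replicate 8 (0 : Int)),
      PySem.Dict.items_eq_map_keys _ hnd2 (List.replicate 8 (0 : Int)),
      pv_keys_eq]
  exact List.map_congr_left (fun ℓ _ => by rw [pv_getD_eq displays hpre ℓ])
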